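-- pv_equiv track=rewrite | github.com/johnwroge/DSA | Algorithms/greedy-algorithms/interval-scheduling.py | resource_allocation_intervals
-- ===== SOURCE A (Python) =====
-- from collections import defaultdict
--
-- def resource_allocation_intervals(requests, resources):
--     """
--     Allocate resources to interval requests
--     requests: list of (start, end, resource_type)
--     resources: dict mapping resource_type to count
--     """
--     # Group requests by resource type
--     by_resource = defaultdict(list)
--     for start, end, resource_type in requests:
--         by_resource[resource_type].append((start, end))
--
--     allocated = []
--
--     for resource_type, intervals in by_resource.items():
--         if resource_type not in resources:
--             continue
--
--         # Sort intervals by end time for this resource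
--         intervals.sort(key=lambda x: x[1])
--
--         # Greedy allocation
--         available_resources = resources[resource_type]
--         resource_end_times = [0] * available_resources
--
--         for start, end in intervals:
--             # Find earliest available resource
--             earliest_idx = 0
--             for i in range(1, available_resources):
--                 if resource_end_times[i] < resource_end_times[earliest_idx]:
--                     earliest_idx = i
--
--             # Check if resource is available
--             if resource_end_times[earliest_idx] <= start:
--                 resource_end_times[earliest_idx] = end
--                 allocated.append((start, end, resource_type, earliest_idx))
--
--     return allocated
-- ===== SOURCE B (Python) =====
-- def resource_allocation_intervals(requests, resources):
--     """
--     Allocate resources to interval requests.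
--     Alternative implementation: keeps each resource pool as a list of
--     (end_time, index) slots maintained in sorted order, so the earliest-free
--     slot is always the head instead of being found by a linear scan.
--     """
--     # Group requests by resource type, remembering first-occurrence order
--     groups = {}
--     order = []
--     for start, end, rtype in requests:
--         if rtype in groups:
--             groups[rtype].append((start, end))
--         else:
--             groups[rtype] = [(start, end)]
--             order.append(rtype)
--
--     allocated = []
--     for rtype in order:
--         avail = resources.get(rtype)
--         if avail is None:
--             continue
--         # sorted pool of (end_time, slot_index); head = earliest-free slot
--         slots = [(0, i) for i in range(avail)]
--         for start, end in sorted(groups[rtype], key=lambda p: p[1]):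
--             free_end, idx = slots[0]
--             if free_end <= start:
--                 slots.pop(0)
--                 _insort(slots, (end, idx))
--                 allocated.append((start, end, rtype, idx))
--     return allocated
--
--
-- def _insort(slots, item):
--     # insert item into the sorted list `slots`, keeping it sorted
--     i = 0
--     while i < len(slots) and slots[i] < item:
--         i += 1
--     slots.insert(i, item)
-- ===== Notes on version B (the rewrite author's own statement) =====
-- stated objective: alternative
-- what changed: Per resource type B keeps the pool as a list of (end_time, slot_index) pairs maintained in sorted order, so the earliest-free slot is always the head and is updated by a sorted re-insertion, replacing A's O(k) linear argmin scan over an end-time array for every request; grouping is done with an explicit first-occurrence order list instead of defaultdict.items().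
import Mathlib
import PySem

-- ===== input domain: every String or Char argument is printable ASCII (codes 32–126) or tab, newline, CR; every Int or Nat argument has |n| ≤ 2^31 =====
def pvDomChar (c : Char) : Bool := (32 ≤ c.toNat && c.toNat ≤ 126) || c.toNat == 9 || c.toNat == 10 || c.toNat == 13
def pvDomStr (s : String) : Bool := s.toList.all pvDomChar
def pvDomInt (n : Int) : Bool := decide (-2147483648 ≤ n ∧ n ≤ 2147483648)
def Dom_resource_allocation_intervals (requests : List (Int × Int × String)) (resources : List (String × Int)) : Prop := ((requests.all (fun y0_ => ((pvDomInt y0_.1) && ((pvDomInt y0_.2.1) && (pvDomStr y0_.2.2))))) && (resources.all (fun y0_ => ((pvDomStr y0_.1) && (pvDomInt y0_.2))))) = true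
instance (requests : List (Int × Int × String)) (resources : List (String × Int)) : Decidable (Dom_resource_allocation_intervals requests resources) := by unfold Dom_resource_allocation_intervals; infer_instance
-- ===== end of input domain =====

-- B replaces A's per-request linear argmin scan over an end-time array by a pool of
-- (end_time, slot_index) pairs kept in sorted order (head = earliest-free slot);
-- objective: alternative algorithm/data structure, same results.

-- ===== PORT A =====

-- inner scan 'for i in range(1, available_resources): if resource_end_times[i] < resource_end_times[earliest_idx]: ...'
-- (pyGetD is exact here: every probed index is in range whenever this loop runs)
def pvArgminA (ets : List Int) (avail : Int) : Int :=
  (PySem.List.pyRange 1 avail 1).foldl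
    (fun best i => if PySem.List.pyGetD ets i 0 < PySem.List.pyGetD ets best 0 then i else best) 0

-- body of A's 'for start, end in intervals' loop; state = (resource_end_times, allocated)
def pvStepA (t : String) (avail : Int) (st : List Int × List (Int × Int × String × Int))
    (q : Int × Int) : List Int × List (Int × Int × String × Int) :=
  let j := pvArgminA st.1 avail
  match PySem.List.pyGet? st.1 j with
  | none => st  -- Python raises IndexError here (empty pool, avail ≤ 0); excluded by Pre_
  | some v => if v ≤ q.1 then (st.1.set j.toNat q.2, st.2 ++ [(q.1, q.2, t, j)]) else st

def resource_allocation_intervals (requests : List (Int × Int × String)) (resources : List (String × Int)) : List (Int × Int × String × Int) :=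
  -- by_resource = defaultdict(list); by_resource[resource_type].append((start, end))
  let byResource : PySem.Dict String (List (Int × Int)) :=
    requests.foldl (fun d r => d.modify r.2.2 [] (fun l => l ++ [(r.1, r.2.1)])) PySem.Dict.empty
  let res : PySem.Dict String Int := PySem.Dict.mk resources
  byResource.items.foldl (fun acc p =>
    if res.contains p.1 = false then acc   -- 'if resource_type not in resources: continue'
    else
      let intervals := PySem.List.sorted p.2 (fun q => q.2) false   -- intervals.sort(key=lambda x: x[1])
      let avail := res.getD p.1 0   -- resources[resource_type]; guarded by the contains check, so getD is exact
      (intervals.foldl (pvStepA p.1 avail) (List.replicate avail.toNat 0, acc)).2) []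

-- ===== PORT B =====

-- Python tuple '<' on (int, int) pairs
abbrev pvLexLt (p q : Int × Int) : Prop := p.1 < q.1 ∨ (p.1 = q.1 ∧ p.2 < q.2)

-- Source B's _insort: advance while slots[i] < item, then insert
def pvLexInsert (x : Int × Int) : List (Int × Int) → List (Int × Int)
  | [] => [x]
  | y :: ys => if pvLexLt y x then y :: pvLexInsert x ys else x :: y :: ys

-- body of B's per-request loop; state = (sorted slots, allocated)
def pvStepB (t : String) (st : List (Int × Int) × List (Int × Int × String × Int))
    (q : Int × Int) : List (Int × Int) × List (Int × Int × String × Int) :=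
  match st.1 with
  | [] => st  -- Python raises IndexError here (slots[0] on empty pool); excluded by Pre_
  | s0 :: rest =>
    if s0.1 ≤ q.1 then (pvLexInsert (q.2, s0.2) rest, st.2 ++ [(q.1, q.2, t, s0.2)]) else st

def resource_allocation_intervals_alt (requests : List (Int × Int × String)) (resources : List (String × Int)) : List (Int × Int × String × Int) :=
  -- grouping with an explicit first-occurrence order list
  let g := requests.foldl
    (fun (st : PySem.Dict String (List (Int × Int)) × List String) r =>
      if st.1.contains r.2.2 then (st.1.insert r.2.2 (st.1.getD r.2.2 [] ++ [(r.1, r.2.1)]), st.2)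
      else (st.1.insert r.2.2 [(r.1, r.2.1)], st.2 ++ [r.2.2]))
    (PySem.Dict.empty, [])
  let res : PySem.Dict String Int := PySem.Dict.mk resources
  g.2.foldl (fun acc t =>
    match res.get? t with   -- avail = resources.get(rtype); if avail is None: continue
    | none => acc
    | some avail =>
      ((PySem.List.sorted (g.1.getD t []) (fun q => q.2) false).foldl (pvStepB t)
        ((PySem.List.pyRange 0 avail 1).map (fun i => ((0 : Int), i)), acc)).2) []

-- ===== PRECONDITION & SPEC =====
-- Pre_ excludes exactly the inputs where Python A raises IndexError: some request names a
-- resource type whose count in resources is ≤ 0 ('[0]*count' is empty, 'resource_end_times[0]'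
-- raises).  'Each requested type, if present in resources, has count ≥ 1':
def Pre_resource_allocation_intervals (requests : List (Int × Int × String)) (resources : List (String × Int)) : Prop :=
  ∀ r ∈ requests, 1 ≤ (((PySem.Dict.mk resources : PySem.Dict String Int).get? r.2.2).getD 1)
instance (requests : List (Int × Int × String)) (resources : List (String × Int)) : Decidable (Pre_resource_allocation_intervals requests resources) := by unfold Pre_resource_allocation_intervals; infer_instance
def pvWitness_resource_allocation_intervals : (List (Int × Int × String)) × (List (String × Int)) :=
  ([(0, 2, "a"), (1, 3, "a"), (0, 1, "b")], [("a", 1), ("b", 2)])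

def Spec_resource_allocation_intervals (requests : List (Int × Int × String)) (resources : List (String × Int)) (out : List (Int × Int × String × Int)) : Prop := out = resource_allocation_intervals_alt requests resources
instance (requests : List (Int × Int × String)) (resources : List (String × Int)) (out : List (Int × Int × String × Int)) : Decidable (Spec_resource_allocation_intervals requests resources out) := by unfold Spec_resource_allocation_intervals; infer_instance

-- ===== CLAIM (what is proved, stated in full; the proofs are below) =====
def Claim_equal_resource_allocation_intervals : Prop := ∀ (requests : List (Int × Int × String)) (resources : List (String × Int)), Dom_resource_allocation_intervals requests resources → Pre_resource_allocation_intervals requests resources → Spec_resource_allocation_intervals requests resources (resource_allocation_intervals requests resources)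

-- ===== LEMMAS AND PROOFS =====

-- the pool of A, as (end_time, index) pairs
def pvEnum (ets : List Int) : List (Int × Int) := ets.zipIdx.map (fun p => (p.1, (p.2 : Int)))

abbrev pvLexLe (p q : Int × Int) : Prop := p.1 < q.1 ∨ (p.1 = q.1 ∧ p.2 ≤ q.2)

lemma pvEnum_length (ets : List Int) : (pvEnum ets).length = ets.length := by
  simp [pvEnum]

lemma pvEnum_getElem (ets : List Int) (i : Nat) (h : i < ets.length) :
    (pvEnum ets)[i]'(by simpa [pvEnum_length] using h) = (ets[i], (i : Int)) := by
  simp [pvEnum]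

lemma mem_pvEnum (ets : List Int) (x : Int × Int) :
    x ∈ pvEnum ets ↔ ∃ i : Nat, ∃ h : i < ets.length, x = (ets[i], (i : Int)) := by
  rw [List.mem_iff_getElem]
  constructor
  · rintro ⟨i, hi, rfl⟩
    have hi' : i < ets.length := by simpa [pvEnum_length] using hi
    exact ⟨i, hi', pvEnum_getElem ets i hi'⟩
  · rintro ⟨i, h, rfl⟩
    exact ⟨i, by simpa [pvEnum_length] using h, pvEnum_getElem ets i h⟩

lemma pvEnum_idx_nodup (ets : List Int) : ((pvEnum ets).map (fun p => p.2)).Nodup := by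
  have h1 : (pvEnum ets).map (fun p => p.2) = ets.zipIdx.map (fun p => ((p.2 : Nat) : Int)) := by
    rw [pvEnum, List.map_map]; rfl
  have h2 : (fun p : Int × Nat => ((p.2 : Nat) : Int)) = (fun n : Nat => (n : Int)) ∘ Prod.snd := rfl
  rw [h1, h2, ← List.map_map, List.zipIdx_map_snd]
  exact (List.nodup_range').map Nat.cast_injective

lemma pvEnum_set (ets : List Int) (j : Nat) (v : Int) (hj : j < ets.length) :
    pvEnum (ets.set j v) = (pvEnum ets).set j (v, (j : Int)) := by
  apply List.ext_getElem
  · simp [pvEnum_length]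
  · intro i h1 h2
    have hi : i < ets.length := by simpa [pvEnum_length] using h1
    rw [pvEnum_getElem _ i (by simpa using hi)]
    by_cases hij : i = j
    · subst hij
      simp
    · rw [List.getElem_set_ne (by omega), List.getElem_set_ne (by omega), pvEnum_getElem _ i hi]

lemma set_perm_cons_eraseIdx {α : Type} (l : List α) (j : Nat) (x : α) (hj : j < l.length) :
    (l.set j x).Perm (x :: l.eraseIdx j) := by
  rw [List.set_eq_take_append_cons_drop, if_pos hj, List.eraseIdx_eq_take_drop_succ]
  exact List.perm_middle

lemma perm_cons_getElem_eraseIdx {α : Type} (l : List α) (j : Nat) (hj : j < l.length) :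
    l.Perm (l[j] :: l.eraseIdx j) := by
  have := set_perm_cons_eraseIdx l j (l[j]'hj) hj
  rwa [List.set_getElem_self hj] at this

lemma pvLexLe_antisymm {x y : Int × Int} (h1 : pvLexLe x y) (h2 : pvLexLe y x) : x = y := by
  obtain ⟨a, b⟩ := x; obtain ⟨c, d⟩ := y
  simp only [pvLexLe] at h1 h2
  have : a = c ∧ b = d := by omega
  simp [this.1, this.2]

lemma pvLexLt_total {x y : Int × Int} (h : ¬ pvLexLt x y) (hne : x.2 ≠ y.2) : pvLexLt y x := by
  simp only [pvLexLt] at *; omega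

lemma mem_pvLexInsert (x z : Int × Int) (l : List (Int × Int)) :
    z ∈ pvLexInsert x l ↔ z = x ∨ z ∈ l := by
  induction l with
  | nil => simp [pvLexInsert]
  | cons y ys ih =>
    by_cases h : pvLexLt y x
    · simp only [pvLexInsert, if_pos h, List.mem_cons, ih]
      tauto
    · simp only [pvLexInsert, if_neg h, List.mem_cons]

lemma pvLexInsert_perm (x : Int × Int) (l : List (Int × Int)) :
    (pvLexInsert x l).Perm (x :: l) := by
  induction l with
  | nil => simp [pvLexInsert]
  | cons y ys ih =>
    by_cases h : pvLexLt y x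
    · simp only [pvLexInsert, if_pos h]
      exact (ih.cons y).trans (List.Perm.swap x y ys)
    · simp [pvLexInsert, if_neg h]

lemma pvLexLt_trans {x y z : Int × Int} (h1 : pvLexLt x y) (h2 : pvLexLt y z) : pvLexLt x z := by
  simp only [pvLexLt] at *; omega

lemma pvLexInsert_pairwise (x : Int × Int) (l : List (Int × Int))
    (hl : l.Pairwise pvLexLt) (hx : ∀ y ∈ l, x.2 ≠ y.2) :
    (pvLexInsert x l).Pairwise pvLexLt := by
  induction l with
  | nil => simp [pvLexInsert]
  | cons y ys ih =>
    rcases List.pairwise_cons.mp hl with ⟨hy, hys⟩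
    by_cases h : pvLexLt y x
    · simp only [pvLexInsert, if_pos h]
      refine List.pairwise_cons.mpr ⟨?_, ih hys (fun z hz => hx z (by simp [hz]))⟩
      intro z hz
      rcases (mem_pvLexInsert x z ys).mp hz with rfl | hz
      · exact h
      · exact hy z hz
    · simp only [pvLexInsert, if_neg h]
      have hxy : pvLexLt x y := pvLexLt_total h (Ne.symm (hx y (by simp)))
      refine List.pairwise_cons.mpr ⟨?_, hl⟩
      intro z hz
      rcases List.mem_cons.mp hz with rfl | hz
      · exact hxy
      · exact pvLexLt_trans hxy (hy z hz)

-- head of a pvLexLt-sorted list is lex-≤ every member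
lemma head_lexLe {s0 : Int × Int} {rest : List (Int × Int)}
    (h : (s0 :: rest).Pairwise pvLexLt) :
    ∀ y ∈ s0 :: rest, pvLexLe s0 y := by
  intro y hy
  rcases List.mem_cons.mp hy with rfl | hy
  · obtain ⟨a, b⟩ := y; simp [pvLexLe]
  · have := (List.pairwise_cons.mp h).1 y hy
    simp only [pvLexLt] at this; simp only [pvLexLe]; omega

-- characterisation of A's argmin scan: it returns the lexicographic minimum of (value, index)
lemma argmin_loop (ets : List Int) (n : Nat) (h1 : 1 ≤ n) (hn : n ≤ ets.length) :
    ∃ j : Nat, ∃ hj : j < n,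
      (PySem.List.pyRange 1 (n : Int) 1).foldl
        (fun best i => if PySem.List.pyGetD ets i 0 < PySem.List.pyGetD ets best 0 then i
                       else best) 0 = (j : Int) ∧
      ∀ i : Nat, ∀ hi : i < n, ets[j]'(by omega) < ets[i]'(by omega) ∨
        (ets[j]'(by omega) = ets[i]'(by omega) ∧ j ≤ i) := by
  induction n with
  | zero => omega
  | succ m ih =>
    by_cases hm : m = 0
    · subst hm
      refine ⟨0, by omega, ?_, ?_⟩
      · rw [show ((1 : Nat) : Int) = 1 by norm_num, PySem.List.pyRange_one_eq_nil (by norm_num)]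
        rfl
      · intro i hi
        interval_cases i
        exact Or.inr ⟨rfl, le_refl _⟩
    · obtain ⟨j, hj, heq, hmin⟩ := ih (by omega) (by omega)
      have hjlen : j < ets.length := by omega
      have hmlen : m < ets.length := by omega
      have hgm : PySem.List.pyGetD ets ((m : Nat) : Int) 0 = ets[m]'hmlen := by
        rw [PySem.List.pyGetD_natCast, List.getD_eq_getElem ets 0 hmlen]
      have hgj : PySem.List.pyGetD ets ((j : Nat) : Int) 0 = ets[j]'hjlen := by
        rw [PySem.List.pyGetD_natCast, List.getD_eq_getElem ets 0 hjlen]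
      have hsplit : PySem.List.pyRange 1 ((m + 1 : Nat) : Int) 1 =
          PySem.List.pyRange 1 ((m : Nat) : Int) 1 ++ [((m : Nat) : Int)] := by
        rw [show ((m + 1 : Nat) : Int) = ((m : Nat) : Int) + 1 by push_cast; ring]
        exact PySem.List.pyRange_one_succ_right (by exact_mod_cast Nat.one_le_iff_ne_zero.mpr hm)
      rw [hsplit, List.foldl_append, heq]
      simp only [List.foldl_cons, List.foldl_nil]
      rw [hgm, hgj]
      by_cases hlt : ets[m]'hmlen < ets[j]'hjlen
      · refine ⟨m, by omega, by rw [if_pos hlt], ?_⟩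
        intro i hi
        by_cases him : i = m
        · subst him; exact Or.inr ⟨rfl, le_refl _⟩
        · rcases hmin i (by omega) with h | h
          · exact Or.inl (by omega)
          · exact Or.inl (by omega)
      · refine ⟨j, by omega, by rw [if_neg hlt], ?_⟩
        intro i hi
        by_cases him : i = m
        · subst him
          rcases lt_or_eq_of_le (not_lt.mp hlt) with h | h
          · exact Or.inl h
          · exact Or.inr ⟨h, by omega⟩
        · exact hmin i (by omega)

lemma argminA_spec (ets : List Int) (hne : ets ≠ []) :
    ∃ j : Nat, ∃ hj : j < ets.length, pvArgminA ets (ets.length : Int) = (j : Int) ∧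
      ∀ i : Nat, ∀ hi : i < ets.length, pvLexLe (ets[j]'hj, (j : Int)) (ets[i], (i : Int)) := by
  have hlen : 1 ≤ ets.length := by have := List.length_pos_iff.mpr hne; omega
  obtain ⟨j, hj, heq, hmin⟩ := argmin_loop ets ets.length hlen (le_refl _)
  refine ⟨j, hj, heq, ?_⟩
  intro i hi
  rcases hmin i hi with h | h
  · exact Or.inl h
  · exact Or.inr ⟨h.1, by simp only []; exact_mod_cast h.2⟩

-- one step of the two inner loops, related by the sorted-pool invariant
lemma step_sim (t : String) (avail : Int) (ets : List Int) (slots : List (Int × Int))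
    (acc : List (Int × Int × String × Int)) (q : Int × Int)
    (hlen : ets.length = avail.toNat)
    (hperm : slots.Perm (pvEnum ets))
    (hsort : slots.Pairwise pvLexLt) :
    (pvStepA t avail (ets, acc) q).2 = (pvStepB t (slots, acc) q).2 ∧
    (pvStepA t avail (ets, acc) q).1.length = avail.toNat ∧
    (pvStepB t (slots, acc) q).1.Perm (pvEnum (pvStepA t avail (ets, acc) q).1) ∧
    (pvStepB t (slots, acc) q).1.Pairwise pvLexLt := by
  by_cases hne : ets = []
  · subst hne
    have hs : slots = [] := hperm.eq_nil
    subst hs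
    have hA : pvStepA t avail ([], acc) q = ([], acc) := by
      simp [pvStepA, PySem.List.pyGet?]
    have hB : pvStepB t (([] : List (Int × Int)), acc) q = ([], acc) := rfl
    rw [hA, hB]
    exact ⟨rfl, hlen, List.Perm.refl _, List.Pairwise.nil⟩
  · obtain ⟨j, hj, heq, hmin⟩ := argminA_spec ets hne
    have h0 : 0 < ets.length := List.length_pos_iff.mpr hne
    have havail : avail = (ets.length : Int) := by omega
    cases slots with
    | nil =>
      exact absurd (hperm.length_eq) (by simp [pvEnum_length]; omega)
    | cons s0 rest =>
      have hmem1 : ((ets[j]'hj, (j : Int)) : Int × Int) ∈ s0 :: rest :=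
        hperm.mem_iff.mpr ((mem_pvEnum ets _).mpr ⟨j, hj, rfl⟩)
      have hmem0 : s0 ∈ pvEnum ets := hperm.mem_iff.mp (by simp)
      obtain ⟨i0, hi0, hs0eq⟩ := (mem_pvEnum ets s0).mp hmem0
      have hle1 : pvLexLe s0 (ets[j]'hj, (j : Int)) := head_lexLe hsort _ hmem1
      have hle2 : pvLexLe (ets[j]'hj, (j : Int)) s0 := by rw [hs0eq]; exact hmin i0 hi0
      have hs0 : s0 = (ets[j]'hj, (j : Int)) := pvLexLe_antisymm hle1 hle2
      subst hs0
      have hj' : pvArgminA ets avail = (j : Int) := by rw [havail]; exact heq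
      have hget : PySem.List.pyGet? ets ((j : Nat) : Int) = some (ets[j]'hj) := by
        rw [PySem.List.pyGet?_natCast, List.getElem?_eq_getElem hj]
      have hA : pvStepA t avail (ets, acc) q =
          (if ets[j]'hj ≤ q.1 then (ets.set j q.2, acc ++ [(q.1, q.2, t, (j : Int))])
           else (ets, acc)) := by
        simp only [pvStepA, hj', hget, Int.toNat_natCast]
      have hB : pvStepB t ((ets[j]'hj, (j : Int)) :: rest, acc) q =
          (if ets[j]'hj ≤ q.1 then (pvLexInsert (q.2, (j : Int)) rest,
              acc ++ [(q.1, q.2, t, (j : Int))])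
           else ((ets[j]'hj, (j : Int)) :: rest, acc)) := rfl
      rw [hA, hB]
      by_cases hcond : ets[j]'hj ≤ q.1
      · rw [if_pos hcond, if_pos hcond]
        have hjE : j < (pvEnum ets).length := by rw [pvEnum_length]; exact hj
        have hEp : (pvEnum ets).Perm ((ets[j]'hj, (j : Int)) :: (pvEnum ets).eraseIdx j) := by
          have h := perm_cons_getElem_eraseIdx (pvEnum ets) j hjE
          rwa [pvEnum_getElem ets j hj] at h
        have hrest : rest.Perm ((pvEnum ets).eraseIdx j) := (hperm.trans hEp).cons_inv
        have hpermNew : (pvLexInsert (q.2, (j : Int)) rest).Perm (pvEnum (ets.set j q.2)) := by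
          refine (pvLexInsert_perm _ _).trans ?_
          refine (hrest.cons _).trans ?_
          rw [pvEnum_set ets j q.2 hj]
          exact (set_perm_cons_eraseIdx (pvEnum ets) j _ hjE).symm
        have hnd : (((ets[j]'hj, (j : Int)) :: rest).map (fun p => p.2)).Nodup :=
          ((hperm.map _).nodup_iff).mpr (pvEnum_idx_nodup ets)
        have hnotmem : ((j : Int)) ∉ rest.map (fun p => p.2) := by
          have h := hnd
          rw [List.map_cons] at h
          exact (List.nodup_cons.mp h).1
        have hxne : ∀ y ∈ rest, ((q.2, (j : Int)) : Int × Int).2 ≠ y.2 := by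
          intro y hy hcontr
          exact hnotmem (by rw [show ((j : Int)) = y.2 from hcontr]; exact List.mem_map_of_mem hy)
        refine ⟨rfl, by simpa using hlen, hpermNew, ?_⟩
        exact pvLexInsert_pairwise _ _ (List.pairwise_cons.mp hsort).2 hxne
      · rw [if_neg hcond, if_neg hcond]
        exact ⟨rfl, hlen, hperm, hsort⟩

lemma inner_sim (t : String) (avail : Int) (intervals : List (Int × Int))
    (ets : List Int) (slots : List (Int × Int)) (acc : List (Int × Int × String × Int))
    (hlen : ets.length = avail.toNat)
    (hperm : slots.Perm (pvEnum ets))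
    (hsort : slots.Pairwise pvLexLt) :
    (intervals.foldl (pvStepA t avail) (ets, acc)).2 =
      (intervals.foldl (pvStepB t) (slots, acc)).2 := by
  induction intervals generalizing ets slots acc with
  | nil => rfl
  | cons q qs ih =>
    obtain ⟨h2, hl, hp, hs⟩ := step_sim t avail ets slots acc q hlen hperm hsort
    simp only [List.foldl_cons]
    rw [show pvStepB t (slots, acc) q =
        ((pvStepB t (slots, acc) q).1, (pvStepA t avail (ets, acc) q).2) by
          rw [h2]]
    exact ih _ _ _ hl hp hs

-- initial pools agree
lemma init_pool (avail : Int) :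
    (PySem.List.pyRange 0 avail 1).map (fun i => ((0 : Int), i)) =
      pvEnum (List.replicate avail.toNat 0) := by
  apply List.ext_getElem
  · simp [pvEnum_length, PySem.List.pyRange_one]
  · intro i h1 h2
    have hi : i < avail.toNat := by simpa [pvEnum_length] using h2
    rw [pvEnum_getElem _ i (by simpa using hi)]
    simp [PySem.List.pyRange_one]

lemma init_sorted (avail : Int) :
    ((PySem.List.pyRange 0 avail 1).map (fun i => ((0 : Int), i))).Pairwise pvLexLt := by
  rw [List.pairwise_map]
  exact (PySem.List.pairwise_lt_pyRange_one 0 avail).imp (fun h => Or.inr ⟨rfl, h⟩)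

-- grouping: B's fold produces A's defaultdict together with its key order
lemma group_sim (requests : List (Int × Int × String))
    (d : PySem.Dict String (List (Int × Int))) (ord : List String) (hk : ord = d.keys) :
    requests.foldl
      (fun (st : PySem.Dict String (List (Int × Int)) × List String) r =>
        if st.1.contains r.2.2 then (st.1.insert r.2.2 (st.1.getD r.2.2 [] ++ [(r.1, r.2.1)]), st.2)
        else (st.1.insert r.2.2 [(r.1, r.2.1)], st.2 ++ [r.2.2])) (d, ord) =
    (requests.foldl (fun d r => d.modify r.2.2 [] (fun l => l ++ [(r.1, r.2.1)])) d,
     (requests.foldl (fun d r => d.modify r.2.2 [] (fun l => l ++ [(r.1, r.2.1)])) d).keys) := by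
  induction requests generalizing d ord with
  | nil => simp [hk]
  | cons r rs ih =>
    subst hk
    simp only [List.foldl_cons]
    have hmod : d.modify r.2.2 [] (fun l => l ++ [(r.1, r.2.1)]) =
        d.insert r.2.2 (d.getD r.2.2 [] ++ [(r.1, r.2.1)]) := rfl
    by_cases h : d.contains r.2.2
    · rw [if_pos h, hmod]
      exact ih _ _ ((PySem.Dict.keys_insert_of_contains d _ h).symm)
    · have hb : d.contains r.2.2 = false := by simpa using h
      have hget : d.getD r.2.2 [] = [] := PySem.Dict.getD_of_not_contains d [] hb
      rw [if_neg h, hmod, hget, List.nil_append]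
      exact ih _ _ ((PySem.Dict.keys_insert_of_not_contains d _ hb).symm)

lemma body_sim (k : String) (resources : List (String × Int)) (ivs : List (Int × Int))
    (acc : List (Int × Int × String × Int)) :
    (if (PySem.Dict.mk resources : PySem.Dict String Int).contains k = false then acc
     else ((PySem.List.sorted ivs (fun q => q.2) false).foldl
        (pvStepA k ((PySem.Dict.mk resources : PySem.Dict String Int).getD k 0))
        (List.replicate ((PySem.Dict.mk resources : PySem.Dict String Int).getD k 0).toNat 0,
         acc)).2) =
    (match (PySem.Dict.mk resources : PySem.Dict String Int).get? k with
     | none => acc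
     | some avail => ((PySem.List.sorted ivs (fun q => q.2) false).foldl (pvStepB k)
        ((PySem.List.pyRange 0 avail 1).map (fun i => ((0 : Int), i)), acc)).2) := by
  cases hg : (PySem.Dict.mk resources : PySem.Dict String Int).get? k with
  | none =>
    rw [if_pos ((PySem.Dict.get?_eq_none_iff_contains _ _).mp hg)]
  | some c =>
    have hc : (PySem.Dict.mk resources : PySem.Dict String Int).contains k = true := by
      cases h : (PySem.Dict.mk resources : PySem.Dict String Int).contains k
      · rw [(PySem.Dict.get?_eq_none_iff_contains (PySem.Dict.mk resources) k).mpr h] at hg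
        cases hg
      · rfl
    rw [if_neg (by simp [hc]), PySem.Dict.getD_of_get?_eq_some _ 0 hg]
    exact inner_sim k c _ _ _ acc (by simp)
      (by rw [init_pool]) (init_sorted c)

-- ===== VERDICT (by name: the statement is the Claim_ definition above) =====
theorem resource_allocation_intervals_spec : Claim_equal_resource_allocation_intervals := by
  intro requests resources _hdom _hpre
  unfold Spec_resource_allocation_intervals
  simp only [resource_allocation_intervals, resource_allocation_intervals_alt]
  rw [group_sim requests PySem.Dict.empty [] (by rw [PySem.Dict.keys_empty])]
  have hnodup : (requests.foldl (fun d r => d.modify r.2.2 [] (fun l => l ++ [(r.1, r.2.1)]))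
      PySem.Dict.empty).keys.Nodup :=
    PySem.Dict.nodup_keys_foldl_modify_key requests (fun r => r.2.2) []
      (fun _ r => fun l => l ++ [(r.1, r.2.1)]) PySem.Dict.empty (by simp [PySem.Dict.keys_empty])
  rw [PySem.Dict.items_eq_map_keys _ hnodup [], List.foldl_map]
  simp only []
  exact PySem.List.foldl_congr_mem _ _ _ _ (fun acc k _ => body_sim k resources
    ((requests.foldl (fun d r => d.modify r.2.2 [] (fun l => l ++ [(r.1, r.2.1)]))
      PySem.Dict.empty).getD k []) acc)
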